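-- pv_equiv track=rewrite | github.com/Runarok/GeeksForGeeks-solutions | Difficulty: Medium/Special Keyboard/special-keyboard.py | optimalKeys
-- ===== SOURCE A (Python) =====
-- def optimalKeys(N):
--     # dp[i] will store the maximum number of 'A's that can be printed using exactly i presses
--     dp = [0] * (N + 1)
--
--     # Fill dp array for the base case where pressing key 1 gives 1 'A' for each press
--     for i in range(1, N + 1):
--         dp[i] = i  # Best case: just print 'A' i times.
--
--     # Iterate through all the possible numbers of key presses from 4 to N
--     for i in range(4, N + 1):
--         for j in range(1, i - 2):  # Split into j presses for 'A's and (i - j - 1) for copying and pasting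
--             dp[i] = max(dp[i], dp[j] * (i - j - 1))  # Try a copy-paste strategy
--
--     return dp[N]
-- ===== SOURCE B (Python) =====
-- def optimalKeys(N):
--     if N < 7:
--         return N
--     # rolling window (a, b, c, d, e) = (dp[i-5], dp[i-4], dp[i-3], dp[i-2], dp[i-1])
--     a, b, c, d, e = 2, 3, 4, 5, 6
--     for i in range(7, N + 1):
--         a, b, c, d, e = b, c, d, e, max(2 * c, 3 * b, 4 * a)
--     return e
-- ===== Notes on version B (the rewrite author's own statement) =====
-- stated objective: faster
-- what changed: A tries every breakpoint j for each i (O(N^2)); B uses the fact that an optimal last copy-paste block multiplies by 2, 3 or 4, giving the constant-breakpoint recurrence dp[i] = max(2*dp[i-3], 3*dp[i-4], 4*dp[i-5]) for i >= 7, computed in one pass with a rolling 5-value window.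
-- outside the precondition, e.g. on optimalKeys(-1): A raises IndexError, B returns -1
import Mathlib
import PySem

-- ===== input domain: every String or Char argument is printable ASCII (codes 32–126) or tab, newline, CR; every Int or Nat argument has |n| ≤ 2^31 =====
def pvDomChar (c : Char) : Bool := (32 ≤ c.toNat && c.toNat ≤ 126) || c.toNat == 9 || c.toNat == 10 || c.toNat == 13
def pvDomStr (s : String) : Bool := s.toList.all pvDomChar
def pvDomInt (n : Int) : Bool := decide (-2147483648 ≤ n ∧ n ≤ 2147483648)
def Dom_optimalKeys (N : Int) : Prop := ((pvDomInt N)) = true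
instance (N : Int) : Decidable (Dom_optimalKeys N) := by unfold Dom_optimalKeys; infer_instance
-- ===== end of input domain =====

-- B replaces A's quadratic scan over all breakpoints by the constant-size recurrence
-- dp[i] = max(2·dp[i-3], 3·dp[i-4], 4·dp[i-5]) (i ≥ 7) kept in a rolling 5-value window.

-- ===== PORT A =====
def optimalKeys (N : Int) : Int :=
  -- dp = [0] * (N + 1)
  let dp := List.replicate (N + 1).toNat (0 : Int)
  -- for i in range(1, N + 1): dp[i] = i
  let dp := (PySem.List.pyRange 1 (N + 1) 1).foldl (fun dp i => PySem.List.pySetD dp i i) dp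
  -- for i in range(4, N + 1): for j in range(1, i - 2): dp[i] = max(dp[i], dp[j] * (i - j - 1))
  let dp := (PySem.List.pyRange 4 (N + 1) 1).foldl (fun dp i =>
    (PySem.List.pyRange 1 (i - 2) 1).foldl (fun dp j =>
      PySem.List.pySetD dp i
        (max (PySem.List.pyGetD dp i 0) (PySem.List.pyGetD dp j 0 * (i - j - 1)))) dp) dp
  PySem.List.pyGetD dp N 0

-- ===== PORT B =====
def optimalKeys_alt (N : Int) : Int :=
  if N < 7 then N
  else
    let s := (PySem.List.pyRange 7 (N + 1) 1).foldl
      (fun (s : Int × Int × Int × Int × Int) _i =>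
        match s with
        | (a, b, c, d, e) => (b, c, d, e, max (max (2 * c) (3 * b)) (4 * a)))
      (2, 3, 4, 5, 6)
    s.2.2.2.2

-- ===== PRECONDITION & SPEC =====
-- Pre_ excludes N < 0, where Python A raises IndexError (dp is empty and dp[N] is read).
def Pre_optimalKeys (N : Int) : Prop := 0 ≤ N
instance (N : Int) : Decidable (Pre_optimalKeys N) := by unfold Pre_optimalKeys; infer_instance
def pvWitness_optimalKeys : Int := 10

def Spec_optimalKeys (N : Int) (out : Int) : Prop := out = optimalKeys_alt N
instance (N : Int) (out : Int) : Decidable (Spec_optimalKeys N out) := by unfold Spec_optimalKeys; infer_instance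

-- ===== CLAIM (what is proved, stated in full; the proofs are below) =====
def Claim_equal_optimalKeys : Prop := ∀ (N : Int), Dom_optimalKeys N → Pre_optimalKeys N → Spec_optimalKeys N (optimalKeys N)

-- ===== LEMMAS AND PROOFS =====

-- Rolling window of B's recurrence, structurally (kernel-reducible).
def bw : Nat → Nat × Nat × Nat × Nat × Nat
  | 0 => (2, 3, 4, 5, 6)
  | k + 1 =>
    match bw k with
    | (a, b, c, d, e) => (b, c, d, e, max (max (2 * c) (3 * b)) (4 * a))

-- The value both programs compute at n keystrokes.
def bf (n : Nat) : Nat := if n < 7 then n else (bw (n - 6)).2.2.2.2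

theorem bf_small {n : Nat} (h : n < 7) : bf n = n := by simp [bf, h]

theorem bw_spec (k : Nat) : bw k = (bf (k + 2), bf (k + 3), bf (k + 4), bf (k + 5), bf (k + 6)) := by
  induction k with
  | zero => decide
  | succ k ih =>
    have hstep : bw (k + 1)
        = (bf (k + 3), bf (k + 4), bf (k + 5), bf (k + 6),
           max (max (2 * bf (k + 4)) (3 * bf (k + 3))) (4 * bf (k + 2))) := by
      rw [bw, ih]
    have hlast : bf (k + 7) = (bw (k + 1)).2.2.2.2 := by
      unfold bf
      rw [if_neg (by omega), show k + 7 - 6 = k + 1 from by omega]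
    rw [hstep] at hlast ⊢
    have e2 : k + 1 + 2 = k + 3 := by omega
    have e3 : k + 1 + 3 = k + 4 := by omega
    have e4 : k + 1 + 4 = k + 5 := by omega
    have e5 : k + 1 + 5 = k + 6 := by omega
    have e6 : k + 1 + 6 = k + 7 := by omega
    simp only [e2, e3, e4, e5, e6, hlast]

theorem bf_rec {n : Nat} (h : 7 ≤ n) :
    bf n = max (max (2 * bf (n - 3)) (3 * bf (n - 4))) (4 * bf (n - 5)) := by
  have hk : n - 6 = (n - 7) + 1 := by omega
  have : bf n = (bw (n - 6)).2.2.2.2 := by unfold bf; rw [if_neg (by omega)]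
  have a1 : n - 7 + 4 = n - 3 := by omega
  have a2 : n - 7 + 3 = n - 4 := by omega
  have a3 : n - 7 + 2 = n - 5 := by omega
  rw [this, hk, bw, bw_spec (n - 7), a1, a2, a3]

theorem mul_max_le {a x y c : Nat} (hx : a * x ≤ c) (hy : a * y ≤ c) : a * max x y ≤ c := by
  rcases Nat.le_total x y with h | h
  · rwa [Nat.max_eq_right h]
  · rwa [Nat.max_eq_left h]

theorem bf_ge (n : Nat) : n ≤ bf n := by
  induction n using Nat.strong_induction_on with
  | _ n ih =>
    by_cases h : n < 7
    · rw [bf_small h]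
    · push_neg at h
      have h3 := ih (n - 3) (by omega)
      have : 2 * bf (n - 3) ≤ bf n := by
        rw [bf_rec h]; exact le_max_of_le_left (le_max_left _ _)
      omega

theorem bf_L2 {j : Nat} (h : 1 ≤ j) : 2 * bf j ≤ bf (j + 3) := by
  by_cases h4 : 4 ≤ j
  · rw [bf_rec (by omega : 7 ≤ j + 3), show j + 3 - 3 = j from by omega]
    exact le_max_of_le_left (le_max_left _ _)
  · interval_cases j <;> decide

theorem bf_L3 {j : Nat} (h : 1 ≤ j) : 3 * bf j ≤ bf (j + 4) := by
  by_cases h4 : 3 ≤ j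
  · rw [bf_rec (by omega : 7 ≤ j + 4), show j + 4 - 4 = j from by omega]
    exact le_max_of_le_left (le_max_right _ _)
  · interval_cases j <;> decide

theorem bf_L4 {j : Nat} (h : 1 ≤ j) : 4 * bf j ≤ bf (j + 5) := by
  by_cases h4 : 2 ≤ j
  · rw [bf_rec (by omega : 7 ≤ j + 5), show j + 5 - 5 = j from by omega]
    exact le_max_right _ _
  · interval_cases j <;> decide

theorem bf_V {j : Nat} (h : 5 ≤ j) : 5 * bf j ≤ 3 * bf (j + 2) := by
  induction j using Nat.strong_induction_on with
  | _ j ih =>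
    by_cases h10 : j ≤ 9
    · interval_cases j <;> decide
    · push_neg at h10
      have hj7 : 7 ≤ j := by omega
      have hrec2 : bf (j + 2) = max (max (2 * bf (j - 1)) (3 * bf (j - 2))) (4 * bf (j - 3)) := by
        rw [bf_rec (by omega : 7 ≤ j + 2), show j + 2 - 3 = j - 1 from by omega,
            show j + 2 - 4 = j - 2 from by omega, show j + 2 - 5 = j - 3 from by omega]
      have t1 : bf (j + 2) ≥ 4 * bf (j - 3) := by rw [hrec2]; exact le_max_right _ _
      have t2 : bf (j + 2) ≥ 3 * bf (j - 2) := by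
        rw [hrec2]; exact le_max_of_le_left (le_max_right _ _)
      have i4 : 5 * bf (j - 4) ≤ 3 * bf (j - 2) := by
        have := ih (j - 4) (by omega) (by omega)
        rwa [show j - 4 + 2 = j - 2 from by omega] at this
      have i5 : 5 * bf (j - 5) ≤ 3 * bf (j - 3) := by
        have := ih (j - 5) (by omega) (by omega)
        rwa [show j - 5 + 2 = j - 3 from by omega] at this
      rw [bf_rec hj7]
      have g1 : 5 * (2 * bf (j - 3)) ≤ 3 * bf (j + 2) := by linarith
      have g2 : 5 * (3 * bf (j - 4)) ≤ 3 * bf (j + 2) := by linarith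
      have g3 : 5 * (4 * bf (j - 5)) ≤ 3 * bf (j + 2) := by linarith
      exact mul_max_le (mul_max_le g1 g2) g3

theorem bf_Q {j : Nat} (h : 1 ≤ j) : 5 * bf j ≤ bf (j + 6) := by
  by_cases h5 : 5 ≤ j
  · have hV := bf_V h5
    have : 3 * bf (j + 2) ≤ bf (j + 6) := by
      rw [bf_rec (by omega : 7 ≤ j + 6), show j + 6 - 4 = j + 2 from by omega]
      exact le_max_of_le_left (le_max_right _ _)
    omega
  · interval_cases j <;> decide

theorem bf_K (m : Nat) (hm : 2 ≤ m) : ∀ {j : Nat}, 1 ≤ j → bf j * m ≤ bf (j + m + 1) := by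
  induction m using Nat.strong_induction_on with
  | _ m ih =>
    intro j hj
    by_cases h6 : m ≤ 5
    · interval_cases m
      · rw [Nat.mul_comm]; exact bf_L2 hj
      · rw [Nat.mul_comm]; exact bf_L3 hj
      · rw [Nat.mul_comm]; exact bf_L4 hj
      · rw [Nat.mul_comm]; exact bf_Q hj
    · push_neg at h6
      have hm3 : 3 ≤ m - 3 := by omega
      have step1 : bf j * m ≤ (2 * bf j) * (m - 3) := by
        have hsplit : bf j * m = bf j * (m - 3) + bf j * 3 := by
          rw [← Nat.mul_add]; congr 1; omega
        have h3 : bf j * 3 ≤ bf j * (m - 3) := Nat.mul_le_mul_left _ hm3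
        have h2 : (2 * bf j) * (m - 3) = bf j * (m - 3) + bf j * (m - 3) := by ring
        rw [hsplit, h2]
        omega
      have step2 : (2 * bf j) * (m - 3) ≤ bf (j + 3) * (m - 3) :=
        Nat.mul_le_mul_right _ (bf_L2 hj)
      have step3 : bf (j + 3) * (m - 3) ≤ bf (j + 3 + (m - 3) + 1) :=
        ih (m - 3) (by omega) (by omega) (by omega)
      calc bf j * m ≤ (2 * bf j) * (m - 3) := step1
        _ ≤ bf (j + 3) * (m - 3) := step2
        _ ≤ bf (j + 3 + (m - 3) + 1) := step3
        _ = bf (j + m + 1) := by rw [show j + 3 + (m - 3) + 1 = j + m + 1 from by omega]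

theorem bf_term {i j : Nat} (h1 : 1 ≤ j) (h2 : j + 3 ≤ i) : bf j * (i - j - 1) ≤ bf i := by
  have hm : 2 ≤ i - j - 1 := by omega
  have := bf_K (i - j - 1) hm h1
  rwa [show j + (i - j - 1) + 1 = i from by omega] at this

theorem foldl_max_le_nat {β : Type} (l : List β) (f : β → Nat) {B : Nat} :
    ∀ {init : Nat}, init ≤ B → (∀ x ∈ l, f x ≤ B) →
      l.foldl (fun acc x => max acc (f x)) init ≤ B := by
  induction l with
  | nil => intro _ h _; exact h
  | cons x xs ih =>
    intro init h0 h
    exact ih (Nat.max_le.mpr ⟨h0, h x (List.mem_cons_self)⟩)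
      (fun y hy => h y (List.mem_cons_of_mem _ hy))

theorem foldA {i : Nat} (h : 4 ≤ i) :
    (List.range (i - 3)).foldl (fun acc k => max acc (bf (k + 1) * (i - (k + 1) - 1))) i = bf i := by
  apply Nat.le_antisymm
  · exact foldl_max_le_nat _ _ (bf_ge i)
      (fun k hk => bf_term (by omega) (by have := List.mem_range.mp hk; omega))
  · have hlo := PySem.List.le_foldl_max_nat (List.range (i - 3))
      (fun k => bf (k + 1) * (i - (k + 1) - 1)) i
    by_cases hi : i < 7
    · rw [bf_small hi]; exact hlo.1
    · push_neg at hi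
      rw [bf_rec hi]
      have m1 := hlo.2 (i - 4) (List.mem_range.mpr (by omega))
      have m2 := hlo.2 (i - 5) (List.mem_range.mpr (by omega))
      have m3 := hlo.2 (i - 6) (List.mem_range.mpr (by omega))
      rw [show i - 4 + 1 = i - 3 from by omega, show i - (i - 3) - 1 = 2 from by omega,
          Nat.mul_comm] at m1
      rw [show i - 5 + 1 = i - 4 from by omega, show i - (i - 4) - 1 = 3 from by omega,
          Nat.mul_comm] at m2
      rw [show i - 6 + 1 = i - 5 from by omega, show i - (i - 5) - 1 = 4 from by omega,
          Nat.mul_comm] at m3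
      exact Nat.max_le.mpr ⟨Nat.max_le.mpr ⟨m1, m2⟩, m3⟩

theorem cast_fold (l : List Nat) (F : Nat → Int) (G : Nat → Nat)
    (h : ∀ x ∈ l, F x = (G x : Int)) :
    ∀ init : Nat, l.foldl (fun acc x => max acc (F x)) (init : Int)
      = ((l.foldl (fun acc x => max acc (G x)) init : Nat) : Int) := by
  induction l with
  | nil => intro init; rfl
  | cons x xs ih =>
    intro init
    have hx := h x (List.mem_cons_self)
    simp only [List.foldl_cons, hx, ← Nat.cast_max]
    exact ih (fun y hy => h y (List.mem_cons_of_mem _ hy)) (max init (G x))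

def model (k L : Nat) : List Int :=
  (List.range L).map (fun n => if n ≤ k then (bf n : Int) else (n : Int))

theorem length_model (k L : Nat) : (model k L).length = L := by simp [model]

theorem getD_model {k L j : Nat} (h1 : j ≤ k) (h2 : j < L) :
    (model k L).getD j 0 = (bf j : Int) := by
  unfold model
  rw [PySem.List.getD_map_range (fun n => if n ≤ k then ((bf n : Nat) : Int) else (n : Int)) L j 0 h2]
  exact if_pos h1

theorem getD_model_gt {k L j : Nat} (h1 : k < j) (h2 : j < L) :
    (model k L).getD j 0 = (j : Int) := by
  unfold model
  rw [PySem.List.getD_map_range (fun n => if n ≤ k then ((bf n : Nat) : Int) else (n : Int)) L j 0 h2]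
  exact if_neg (by omega)

theorem model_init (L : Nat) : model 3 L = (List.range L).map (fun (n : Nat) => (n : Int)) := by
  apply List.ext_getElem
  · simp [model]
  · intro n h1 h2
    simp only [model, List.getElem_map, List.getElem_range]
    by_cases hn : n ≤ 3
    · rw [if_pos hn, bf_small (by omega)]
    · rw [if_neg hn]

theorem model_set {i L : Nat} (h4 : 4 ≤ i) (hiL : i < L) :
    (model (i - 1) L).set i (bf i : Int) = model i L := by
  apply List.ext_getElem
  · simp [model]
  · intro n h1 h2
    rw [List.getElem_set]
    simp only [model, List.getElem_map, List.getElem_range]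
    rcases eq_or_ne i n with hin | hin
    · subst hin
      rw [if_pos rfl, if_pos (le_refl i)]
    · rw [if_neg hin]
      by_cases hn : n ≤ i - 1
      · rw [if_pos hn, if_pos (by omega)]
      · rw [if_neg hn, if_neg (by omega)]

theorem fill (c : Nat) : ∀ (L : Nat), c < L →
    (List.range c).foldl (fun d k => d.set (k + 1) ((k + 1 : Nat) : Int)) (List.replicate L (0 : Int))
      = (List.range L).map (fun n => if n ≤ c then (n : Int) else 0) := by
  induction c with
  | zero =>
    intro L _
    simp only [List.range_zero, List.foldl_nil]
    apply List.ext_getElem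
    · simp
    · intro n h1 h2
      simp only [List.getElem_replicate, List.getElem_map, List.getElem_range]
      by_cases hn : n ≤ 0
      · rw [if_pos hn, show n = 0 from by omega]; rfl
      · rw [if_neg hn]
  | succ c ih =>
    intro L hL
    rw [List.range_succ, List.foldl_append, List.foldl_cons, List.foldl_nil, ih L (by omega)]
    apply List.ext_getElem
    · simp
    · intro n h1 h2
      rw [List.getElem_set]
      simp only [List.getElem_map, List.getElem_range]
      have hn : n < L := by simpa using h2
      rcases eq_or_ne (c + 1) n with he | he
      · rw [if_pos he, if_pos (by omega)]
        exact congrArg _ he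
      · rw [if_neg he]
        by_cases h3 : n ≤ c
        · rw [if_pos h3, if_pos (by omega)]
        · rw [if_neg h3, if_neg (by omega)]

theorem firstLoop (n : Nat) :
    (PySem.List.pyRange 1 ((n : Int) + 1) 1).foldl (fun dp i => PySem.List.pySetD dp i i)
        (List.replicate ((n : Int) + 1).toNat (0 : Int))
      = (List.range (n + 1)).map (fun (m : Nat) => (m : Int)) := by
  rw [PySem.List.pyRange_one, show ((n : Int) + 1 - 1).toNat = n from by omega,
      show ((n : Int) + 1).toNat = n + 1 from by omega, List.foldl_map]
  have hb : ∀ (dp : List Int) (k : Nat),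
      PySem.List.pySetD dp (1 + (k : Int)) (1 + (k : Int)) = dp.set (k + 1) ((k + 1 : Nat) : Int) := by
    intro dp k
    rw [show (1 : Int) + (k : Int) = ((k + 1 : Nat) : Int) from by push_cast; ring,
        PySem.List.pySetD_natCast]
  rw [PySem.List.foldl_congr_mem _ _ (fun d k => d.set (k + 1) ((k + 1 : Nat) : Int)) _
        (fun dp k _ => hb dp k),
      fill n (n + 1) (by omega)]
  apply List.map_congr_left
  intro m hm
  rw [if_pos (by exact Nat.lt_succ_iff.mp (List.mem_range.mp hm))]

theorem setAcc (i : Nat) : ∀ (xs : List Int), (∀ j ∈ xs, 0 ≤ j ∧ j < (i : Int)) →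
    ∀ (dp : List Int), i < dp.length →
    xs.foldl (fun d j => PySem.List.pySetD d (i : Int)
        (max (PySem.List.pyGetD d (i : Int) 0) (PySem.List.pyGetD d j 0 * ((i : Int) - j - 1)))) dp
      = PySem.List.pySetD dp (i : Int)
          (xs.foldl (fun acc j => max acc (PySem.List.pyGetD dp j 0 * ((i : Int) - j - 1)))
            (PySem.List.pyGetD dp (i : Int) 0)) := by
  intro xs
  induction xs with
  | nil =>
    intro _ dp hdp
    simp only [List.foldl_nil]
    rw [PySem.List.pySetD_natCast, PySem.List.pyGetD_natCast,
        List.getD_eq_getElem _ _ hdp, List.set_getElem_self hdp]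
  | cons x xs ih =>
    intro hmem dp hdp
    have hx := hmem x List.mem_cons_self
    simp only [List.foldl_cons]
    set v1 := max (PySem.List.pyGetD dp (i : Int) 0)
        (PySem.List.pyGetD dp x 0 * ((i : Int) - x - 1)) with hv1
    have hlen : i < (PySem.List.pySetD dp (i : Int) v1).length := by
      rw [PySem.List.pySetD_natCast, List.length_set]; exact hdp
    rw [ih (fun j hj => hmem j (List.mem_cons_of_mem _ hj)) _ hlen]
    -- reads of positions < i are unchanged by the set at i
    have hget : ∀ j, 0 ≤ j → j < (i : Int) →
        PySem.List.pyGetD (PySem.List.pySetD dp (i : Int) v1) j 0 = PySem.List.pyGetD dp j 0 := by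
      intro j hj0 hji
      have : j = ((j.toNat : Nat) : Int) := by omega
      rw [this, PySem.List.pyGetD_pySetD_natCast _ _ _ _ _ hdp, if_neg (by omega)]
    have hgeti : PySem.List.pyGetD (PySem.List.pySetD dp (i : Int) v1) (i : Int) 0 = v1 := by
      rw [PySem.List.pyGetD_pySetD_natCast _ _ _ _ _ hdp, if_pos rfl]
    rw [PySem.List.foldl_congr_mem _ _
          (fun acc j => max acc (PySem.List.pyGetD dp j 0 * ((i : Int) - j - 1))) _
          (fun acc j hj => by rw [hget j (hmem j (List.mem_cons_of_mem _ hj)).1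
                                        (hmem j (List.mem_cons_of_mem _ hj)).2]),
        hgeti]
    rw [PySem.List.pySetD_natCast, PySem.List.pySetD_natCast, List.set_set, PySem.List.pySetD_natCast]

theorem innerLoop {i L : Nat} (h4 : 4 ≤ i) (hiL : i < L) :
    (PySem.List.pyRange 1 ((i : Int) - 2) 1).foldl
        (fun dp j => PySem.List.pySetD dp (i : Int)
          (max (PySem.List.pyGetD dp (i : Int) 0) (PySem.List.pyGetD dp j 0 * ((i : Int) - j - 1))))
        (model (i - 1) L)
      = model i L := by
  have hmem : ∀ j ∈ PySem.List.pyRange 1 ((i : Int) - 2) 1, 0 ≤ j ∧ j < (i : Int) := by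
    intro j hj
    have := PySem.List.mem_pyRange_one.mp hj
    omega
  rw [setAcc i _ hmem _ (by rw [length_model]; exact hiL)]
  have hstart : PySem.List.pyGetD (model (i - 1) L) (i : Int) 0 = (i : Int) := by
    rw [PySem.List.pyGetD_natCast]; exact getD_model_gt (by omega) hiL
  rw [hstart, PySem.List.pyRange_one, show ((i : Int) - 2 - 1).toNat = i - 3 from by omega,
      List.foldl_map]
  have hbody : ∀ (acc : Int), ∀ k ∈ List.range (i - 3),
      (fun (acc : Int) (k : Nat) => max acc
          (PySem.List.pyGetD (model (i - 1) L) (1 + (k : Int)) 0 * ((i : Int) - (1 + (k : Int)) - 1))) acc k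
        = (fun (acc : Int) (k : Nat) => max acc ((bf (k + 1) * (i - (k + 1) - 1) : Nat) : Int)) acc k := by
    intro acc k hk
    have hk' := List.mem_range.mp hk
    simp only
    rw [show (1 : Int) + (k : Int) = ((k + 1 : Nat) : Int) from by push_cast; ring,
        PySem.List.pyGetD_natCast,
        getD_model (show k + 1 ≤ i - 1 from by omega) (show k + 1 < L from by omega),
        show (i : Int) - ((k + 1 : Nat) : Int) - 1 = ((i - (k + 1) - 1 : Nat) : Int) from by omega,
        ← Nat.cast_mul]
  rw [PySem.List.foldl_congr_mem _ _ _ _ hbody,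
      cast_fold (List.range (i - 3)) _ (fun k => bf (k + 1) * (i - (k + 1) - 1)) (fun x _ => rfl) i,
      foldA h4, PySem.List.pySetD_natCast, model_set h4 hiL]

theorem outerLoop (t : Nat) : ∀ (i0 L : Nat), 4 ≤ i0 → i0 + t ≤ L →
    (PySem.List.pyRange (i0 : Int) ((i0 + t : Nat) : Int) 1).foldl
        (fun dp i =>
          (PySem.List.pyRange 1 (i - 2) 1).foldl
            (fun dp j => PySem.List.pySetD dp i
              (max (PySem.List.pyGetD dp i 0) (PySem.List.pyGetD dp j 0 * (i - j - 1)))) dp)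
        (model (i0 - 1) L)
      = model (i0 + t - 1) L := by
  induction t with
  | zero =>
    intro i0 L h4 hL
    rw [PySem.List.pyRange_one_eq_nil (by omega), List.foldl_nil]
    rfl
  | succ t ih =>
    intro i0 L h4 hL
    rw [PySem.List.pyRange_one_cons (by push_cast; omega), List.foldl_cons,
        innerLoop h4 (by omega)]
    have h1 : (i0 : Int) + 1 = ((i0 + 1 : Nat) : Int) := by push_cast; ring
    have h2 : ((i0 + (t + 1) : Nat) : Int) = (((i0 + 1) + t : Nat) : Int) := by push_cast; ring
    have h3 : model i0 L = model ((i0 + 1) - 1) L := by rw [show i0 + 1 - 1 = i0 from by omega]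
    rw [h1, h2, h3, ih (i0 + 1) L (by omega) (by omega),
        show i0 + 1 + t - 1 = i0 + (t + 1) - 1 from by omega]

theorem optimalKeys_eq_bf {N : Int} (h : 0 ≤ N) : optimalKeys N = (bf N.toNat : Int) := by
  obtain ⟨n, rfl⟩ : ∃ n : Nat, N = (n : Int) := ⟨N.toNat, by omega⟩
  simp only [optimalKeys, Int.toNat_natCast]
  rw [firstLoop n, ← model_init (n + 1)]
  by_cases h4 : 4 ≤ n
  · rw [show ((n : Int) + 1) = ((4 + (n - 3) : Nat) : Int) from by push_cast; omega,
        show (4 : Int) = ((4 : Nat) : Int) from rfl,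
        show model 3 (n + 1) = model (4 - 1) (n + 1) from rfl,
        outerLoop (n - 3) 4 (n + 1) (by omega) (by omega),
        PySem.List.pyGetD_natCast,
        show 4 + (n - 3) - 1 = n from by omega,
        getD_model (le_refl n) (by omega)]
  · rw [PySem.List.pyRange_one_eq_nil (by push_cast; omega), List.foldl_nil,
        PySem.List.pyGetD_natCast, getD_model (by omega) (by omega)]

theorem bLoop (t : Nat) : ∀ (n : Nat), 7 ≤ n →
    (PySem.List.pyRange (n : Int) ((n + t : Nat) : Int) 1).foldl
        (fun (s : Int × Int × Int × Int × Int) _i =>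
          match s with
          | (a, b, c, d, e) => (b, c, d, e, max (max (2 * c) (3 * b)) (4 * a)))
        (((bf (n - 5) : Nat) : Int), ((bf (n - 4) : Nat) : Int), ((bf (n - 3) : Nat) : Int),
         ((bf (n - 2) : Nat) : Int), ((bf (n - 1) : Nat) : Int))
      = (((bf (n + t - 5) : Nat) : Int), ((bf (n + t - 4) : Nat) : Int), ((bf (n + t - 3) : Nat) : Int),
         ((bf (n + t - 2) : Nat) : Int), ((bf (n + t - 1) : Nat) : Int)) := by
  induction t with
  | zero =>
    intro n h7
    rw [PySem.List.pyRange_one_eq_nil (by omega), List.foldl_nil]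
    rfl
  | succ t ih =>
    intro n h7
    rw [PySem.List.pyRange_one_cons (by push_cast; omega), List.foldl_cons]
    have hlast : max (max (2 * ((bf (n - 3) : Nat) : Int)) (3 * ((bf (n - 4) : Nat) : Int)))
        (4 * ((bf (n - 5) : Nat) : Int)) = ((bf n : Nat) : Int) := by
      rw [bf_rec h7]; push_cast [Nat.cast_max]; ring_nf
    simp only
    rw [hlast]
    have h1 : (n : Int) + 1 = ((n + 1 : Nat) : Int) := by push_cast; ring
    have h2 : ((n + (t + 1) : Nat) : Int) = (((n + 1) + t : Nat) : Int) := by push_cast; ring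
    have e1 : bf (n - 4) = bf ((n + 1) - 5) := by rw [show n + 1 - 5 = n - 4 from by omega]
    have e2 : bf (n - 3) = bf ((n + 1) - 4) := by rw [show n + 1 - 4 = n - 3 from by omega]
    have e3 : bf (n - 2) = bf ((n + 1) - 3) := by rw [show n + 1 - 3 = n - 2 from by omega]
    have e4 : bf (n - 1) = bf ((n + 1) - 2) := by rw [show n + 1 - 2 = n - 1 from by omega]
    have e5 : bf n = bf ((n + 1) - 1) := by rw [show n + 1 - 1 = n from by omega]
    rw [h1, h2, e1, e2, e3, e4, e5, ih (n + 1) (by omega),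
        show n + 1 + t - 5 = n + (t + 1) - 5 from by omega,
        show n + 1 + t - 4 = n + (t + 1) - 4 from by omega,
        show n + 1 + t - 3 = n + (t + 1) - 3 from by omega,
        show n + 1 + t - 2 = n + (t + 1) - 2 from by omega,
        show n + 1 + t - 1 = n + (t + 1) - 1 from by omega]

theorem optimalKeys_alt_eq_bf {N : Int} (h : 0 ≤ N) : optimalKeys_alt N = (bf N.toNat : Int) := by
  obtain ⟨n, rfl⟩ : ∃ n : Nat, N = (n : Int) := ⟨N.toNat, by omega⟩
  simp only [optimalKeys_alt, Int.toNat_natCast]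
  by_cases h7 : (n : Int) < 7
  · rw [if_pos h7, bf_small (by omega)]
  · rw [if_neg h7]
    have hn7 : 7 ≤ n := by omega
    have hinit : ((2 : Int), (3 : Int), (4 : Int), (5 : Int), (6 : Int))
        = (((bf (7 - 5) : Nat) : Int), ((bf (7 - 4) : Nat) : Int), ((bf (7 - 3) : Nat) : Int),
           ((bf (7 - 2) : Nat) : Int), ((bf (7 - 1) : Nat) : Int)) := by decide
    rw [show (7 : Int) = ((7 : Nat) : Int) from rfl,
        show ((n : Int) + 1) = ((7 + (n - 6) : Nat) : Int) from by push_cast; omega,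
        hinit, bLoop (n - 6) 7 (le_refl 7)]
    simp only
    rw [show 7 + (n - 6) - 1 = n from by omega]

-- ===== VERDICT (by name: the statement is the Claim_ definition above) =====
theorem optimalKeys_spec : Claim_equal_optimalKeys := by
  intro N _ hPre
  unfold Spec_optimalKeys
  rw [optimalKeys_eq_bf hPre, optimalKeys_alt_eq_bf hPre]
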